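-- pv_equiv track=rewrite | github.com/riccardocappi/BigDataHW | main.py | compute_outliers
-- ===== SOURCE A (Python) =====
-- def compute_outliers(point_count_map, M):
--     outliers = []
--     uncertain_outliers = []
--     for (x, y) in point_count_map.keys():
--         N3, N7 = 0, 0
--         for i in range(-3, 4):
--             for j in range(-3, 4):
--                 p = (x + i, y + j)
--                 if p in point_count_map:
--                     is_n3 = 0 if (abs(i) >= 2) or (abs(j) >= 2) else 1
--                     count = point_count_map[p]
--                     N3 += count * is_n3
--                     N7 += count
--         if N7 <= M:
--             outliers.append(((x, y), point_count_map[(x, y)]))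
--         elif N3 <= M:
--             uncertain_outliers.append(((x, y), point_count_map[(x, y)]))
--
--     return outliers, uncertain_outliers
-- ===== SOURCE B (Python) =====
-- def _scatter(items, r):
--     # Scatter pass: each occupied cell adds its count to the running
--     # neighborhood total of every cell within Chebyshev distance r.
--     table = {}
--     for (a, b), c in items:
--         for i in range(-r, r + 1):
--             for j in range(-r, r + 1):
--                 q = (a + i, b + j)
--                 table[q] = table.get(q, 0) + c
--     return table
--
--
-- def compute_outliers(point_count_map, M):
--     n7 = _scatter(point_count_map.items(), 3)
--     n3 = _scatter(point_count_map.items(), 1)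
--     # Classification pass: read the tables in the original key order.
--     outliers = []
--     uncertain_outliers = []
--     for cell in point_count_map:
--         if n7.get(cell, 0) <= M:
--             outliers.append((cell, point_count_map[cell]))
--         elif n3.get(cell, 0) <= M:
--             uncertain_outliers.append((cell, point_count_map[cell]))
--     return outliers, uncertain_outliers
-- ===== Notes on version B (the rewrite author's own statement) =====
-- stated objective: alternative
-- what changed: Replaces A's per-cell gather (49 membership probes of the map for every key) by a scatter pass that builds N7/N3 accumulator tables once from the occupied cells, followed by a separate classification pass reading the tables in key order.
import Mathlib
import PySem

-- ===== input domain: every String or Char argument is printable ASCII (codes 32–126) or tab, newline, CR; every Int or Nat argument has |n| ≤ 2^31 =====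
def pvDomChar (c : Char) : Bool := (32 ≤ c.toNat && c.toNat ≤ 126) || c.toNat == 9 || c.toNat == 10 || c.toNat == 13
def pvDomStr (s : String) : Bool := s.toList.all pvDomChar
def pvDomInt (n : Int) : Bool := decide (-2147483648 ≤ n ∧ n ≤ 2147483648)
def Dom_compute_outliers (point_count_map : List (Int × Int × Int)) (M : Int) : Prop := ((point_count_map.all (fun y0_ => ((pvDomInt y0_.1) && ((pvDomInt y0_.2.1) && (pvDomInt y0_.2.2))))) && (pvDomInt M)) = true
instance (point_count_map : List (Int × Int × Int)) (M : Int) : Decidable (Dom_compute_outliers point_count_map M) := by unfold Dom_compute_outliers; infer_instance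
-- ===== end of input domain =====

-- B replaces A's per-cell gather (49 membership probes of the map for every key) by a scatter
-- pass that builds N7/N3 accumulator tables once, then a separate classification pass
-- reading the tables in key order ('alternative': same cost class, different decomposition).

-- Shared input decoding (not part of either algorithm): Python receives a dict, so both
-- ports interpret the item list as that dict (duplicate keys: last value wins, first position).
def pvToDict (point_count_map : List (Int × Int × Int)) : PySem.Dict (Int × Int) Int :=
  PySem.Dict.ofList (point_count_map.map (fun t => ((t.1, t.2.1), t.2.2)))

-- ===== PORT A =====
-- A's inner double loop: for i in range(-3,4): for j in range(-3,4): … accumulating (N3, N7)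
def pvNcounts (d : PySem.Dict (Int × Int) Int) (x y : Int) : Int × Int :=
  (PySem.List.pyRange (-3) 4 1).foldl (fun N i =>
    (PySem.List.pyRange (-3) 4 1).foldl (fun N j =>
      let p := (x + i, y + j)
      if d.contains p then
        let is_n3 : Int := if 2 ≤ |i| ∨ 2 ≤ |j| then 0 else 1
        let count := d.getD p 0    -- point_count_map[p]; guarded by 'p in point_count_map'
        (N.1 + count * is_n3, N.2 + count)
      else N) N) (0, 0)

def compute_outliers (point_count_map : List (Int × Int × Int)) (M : Int) : (List ((Int × Int) × Int)) × (List ((Int × Int) × Int)) :=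
  let d := pvToDict point_count_map
  d.keys.foldl (fun acc xy =>
    let N := pvNcounts d xy.1 xy.2
    if N.2 ≤ M then (acc.1 ++ [(xy, d.getD xy 0)], acc.2)   -- xy ∈ keys, so [·] = getD
    else if N.1 ≤ M then (acc.1, acc.2 ++ [(xy, d.getD xy 0)])
    else acc) ([], [])

-- ===== PORT B =====
-- B's helper _scatter(items, r): table[q] = table.get(q, 0) + c over the (2r+1)² window
def pvScatter (items : List ((Int × Int) × Int)) (r : Int) : PySem.Dict (Int × Int) Int :=
  items.foldl (fun t pc =>
    (PySem.List.pyRange (-r) (r + 1) 1).foldl (fun t i =>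
      (PySem.List.pyRange (-r) (r + 1) 1).foldl (fun t j =>
        t.modify (pc.1.1 + i, pc.1.2 + j) 0 (· + pc.2)) t) t) PySem.Dict.empty

def compute_outliers_alt (point_count_map : List (Int × Int × Int)) (M : Int) : (List ((Int × Int) × Int)) × (List ((Int × Int) × Int)) :=
  let d := pvToDict point_count_map
  let n7 := pvScatter d.items 3
  let n3 := pvScatter d.items 1
  d.keys.foldl (fun acc xy =>
    if n7.getD xy 0 ≤ M then (acc.1 ++ [(xy, d.getD xy 0)], acc.2)
    else if n3.getD xy 0 ≤ M then (acc.1, acc.2 ++ [(xy, d.getD xy 0)])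
    else acc) ([], [])

-- ===== PRECONDITION & SPEC =====
def Spec_compute_outliers (point_count_map : List (Int × Int × Int)) (M : Int) (out : (List ((Int × Int) × Int)) × (List ((Int × Int) × Int))) : Prop := out = compute_outliers_alt point_count_map M
instance (point_count_map : List (Int × Int × Int)) (M : Int) (out : (List ((Int × Int) × Int)) × (List ((Int × Int) × Int))) : Decidable (Spec_compute_outliers point_count_map M out) := by unfold Spec_compute_outliers; infer_instance

-- ===== CLAIM (what is proved, stated in full; the proofs are below) =====
def Claim_equal_compute_outliers : Prop := ∀ (point_count_map : List (Int × Int × Int)) (M : Int), Dom_compute_outliers point_count_map M → Spec_compute_outliers point_count_map M (compute_outliers point_count_map M)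

-- ===== LEMMAS AND PROOFS =====

-- sum of a one-point indicator over a duplicate-free list
lemma pv_sum_indic (L : List Int) (hL : L.Nodup) (t v : Int) :
    (L.map (fun u => if t = u then v else 0)).sum = if t ∈ L then v else 0 := by
  induction L with
  | nil => simp
  | cons u L ih =>
    simp only [List.nodup_cons] at hL
    simp only [List.map_cons, List.sum_cons, ih hL.2, List.mem_cons]
    by_cases h : t = u
    · subst h
      simp [hL.1]
    · simp [h]

-- scattering one value c over a row of keys (a, j), j ∈ L
lemma pv_scatter_j (L : List Int) (hL : L.Nodup) (a c k1 k2 : Int)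
    (s : PySem.Dict (Int × Int) Int) :
    ((L.foldl (fun s j => s.modify (a, j) 0 (· + c)) s).getD (k1, k2) 0)
      = s.getD (k1, k2) 0 + (if k1 = a ∧ k2 ∈ L then c else 0) := by
  induction L generalizing s with
  | nil => simp
  | cons j0 L ih =>
    simp only [List.nodup_cons] at hL
    simp only [List.foldl_cons, ih hL.2, PySem.Dict.getD_modify, List.mem_cons, Prod.mk.injEq]
    by_cases h1 : k1 = a <;> by_cases h2 : k2 = j0 <;> by_cases h3 : k2 ∈ L <;>
        simp [h1, h2, h3, hL.1]

-- scattering one value c over a whole key rectangle I × J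
lemma pv_scatter_ij (I J : List Int) (hI : I.Nodup) (hJ : J.Nodup) (c k1 k2 : Int)
    (s : PySem.Dict (Int × Int) Int) :
    ((I.foldl (fun s i => J.foldl (fun s j => s.modify (i, j) 0 (· + c)) s) s).getD (k1, k2) 0)
      = s.getD (k1, k2) 0 + (if k1 ∈ I ∧ k2 ∈ J then c else 0) := by
  induction I generalizing s with
  | nil => simp
  | cons i0 I ih =>
    simp only [List.nodup_cons] at hI
    simp only [List.foldl_cons, ih hI.2, pv_scatter_j J hJ i0 c k1 k2 s, List.mem_cons]
    by_cases h1 : k1 = i0 <;> by_cases h2 : k2 ∈ J <;> by_cases h3 : k1 ∈ I <;>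
        simp [h1, h2, h3, hI.1]

-- scattering a whole item list: a table entry is the weighted sum of all items
lemma pv_scatter_items (P : List ((Int × Int) × Int)) (I J : List Int)
    (hI : I.Nodup) (hJ : J.Nodup) (k1 k2 : Int) (s : PySem.Dict (Int × Int) Int) :
    ((P.foldl (fun t pc => I.foldl (fun t i => J.foldl (fun t j =>
        t.modify (pc.1.1 + i, pc.1.2 + j) 0 (· + pc.2)) t) t) s).getD (k1, k2) 0)
      = s.getD (k1, k2) 0
        + (P.map (fun pc => if k1 - pc.1.1 ∈ I ∧ k2 - pc.1.2 ∈ J then pc.2 else 0)).sum := by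
  induction P generalizing s with
  | nil => simp
  | cons pc P ih =>
    have conv1 : (I.foldl (fun t i => J.foldl (fun t j =>
          t.modify (pc.1.1 + i, pc.1.2 + j) 0 (· + pc.2)) t) s)
        = ((I.map (pc.1.1 + ·)).foldl (fun t i => ((J.map (pc.1.2 + ·)).foldl (fun t j =>
          t.modify (i, j) 0 (· + pc.2)) t)) s) := by
      simp only [List.foldl_map]
    have hIm : (I.map (pc.1.1 + ·)).Nodup := hI.map (fun u v h => by omega)
    have hJm : (J.map (pc.1.2 + ·)).Nodup := hJ.map (fun u v h => by omega)
    have hmemI : (k1 ∈ I.map (pc.1.1 + ·)) ↔ k1 - pc.1.1 ∈ I := by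
      simp only [List.mem_map]
      exact ⟨fun ⟨w, hw, he⟩ => by rwa [show k1 - pc.1.1 = w from by omega],
        fun h => ⟨k1 - pc.1.1, h, by omega⟩⟩
    have hmemJ : (k2 ∈ J.map (pc.1.2 + ·)) ↔ k2 - pc.1.2 ∈ J := by
      simp only [List.mem_map]
      exact ⟨fun ⟨w, hw, he⟩ => by rwa [show k2 - pc.1.2 = w from by omega],
        fun h => ⟨k2 - pc.1.2, h, by omega⟩⟩
    simp only [List.foldl_cons, ih, conv1,
      pv_scatter_ij (I.map (pc.1.1 + ·)) (J.map (pc.1.2 + ·)) hIm hJm pc.2 k1 k2 s,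
      hmemI, hmemJ, List.map_cons, List.sum_cons]
    ring

-- A's gather order of the same weighted sum (keys of the item list distinct)
lemma pv_gather_sum (items : List ((Int × Int) × Int)) (hnd : (items.map (·.1)).Nodup)
    (I J : List Int) (hI : I.Nodup) (hJ : J.Nodup) (x y : Int)
    (P : Int → Int → Prop) [∀ i j, Decidable (P i j)] :
    (I.map (fun i => (J.map (fun j =>
        (PySem.Dict.mk items).getD (x + i, y + j) 0 * (if P i j then 1 else 0))).sum)).sum
      = (items.map (fun pc =>
          if (pc.1.1 - x ∈ I ∧ pc.1.2 - y ∈ J) ∧ P (pc.1.1 - x) (pc.1.2 - y)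
          then pc.2 else 0)).sum := by
  induction items with
  | nil =>
    have h0 : ∀ q1 q2 : Int, (PySem.Dict.mk ([] : List ((Int × Int) × Int))).getD (q1, q2) 0 = 0 := by
      intro q1 q2; rfl
    simp [h0]
  | cons pc rest ih =>
    simp only [List.map_cons, List.nodup_cons] at hnd
    have hget : ∀ q1 q2 : Int,
        (PySem.Dict.mk (pc :: rest)).getD (q1, q2) 0
          = (PySem.Dict.mk rest).getD (q1, q2) 0
            + (if pc.1.1 = q1 ∧ pc.1.2 = q2 then pc.2 else 0) := by
      intro q1 q2
      rw [PySem.Dict.getD_eq_get?_getD, PySem.Dict.get?_mk_cons,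
        PySem.Dict.getD_eq_get?_getD]
      by_cases h : pc.1 = (q1, q2)
      · have hb : (pc.1 == (q1, q2)) = true := by simp [h]
        have hc : (PySem.Dict.mk rest).get? (q1, q2) = none := by
          rw [PySem.Dict.get?_eq_none_iff_not_mem_keys]
          intro hm
          apply hnd.1
          rw [h]
          simpa [PySem.Dict.keys] using hm
        have hq : pc.1.1 = q1 ∧ pc.1.2 = q2 := by
          exact ⟨by rw [h], by rw [h]⟩
        simp [hb, hc, hq]
      · have hb : (pc.1 == (q1, q2)) = false := by simpa using h
        have hq : ¬ (pc.1.1 = q1 ∧ pc.1.2 = q2) := by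
          intro hc
          exact h (by rw [show pc.1 = (pc.1.1, pc.1.2) from rfl, hc.1, hc.2])
        simp [hb, hq]
    calc (I.map (fun i => (J.map (fun j =>
            (PySem.Dict.mk (pc :: rest)).getD (x + i, y + j) 0 * (if P i j then 1 else 0))).sum)).sum
        = (I.map (fun i => (J.map (fun j =>
            (PySem.Dict.mk rest).getD (x + i, y + j) 0 * (if P i j then 1 else 0))).sum
            + (J.map (fun j => (if pc.1.2 - y = j then
                (if P i j then (if pc.1.1 - x = i then pc.2 else 0) else 0) else 0))).sum)).sum := by
          apply congrArg List.sum
          apply List.map_congr_left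
          intro i _
          rw [← PySem.List.sum_map_add_int]
          apply congrArg List.sum
          apply List.map_congr_left
          intro j _
          rw [hget]
          by_cases h1 : pc.1.1 - x = i <;> by_cases h2 : pc.1.2 - y = j <;>
            by_cases hp : P i j <;>
            simp [h1, h2, hp, show pc.1.1 = x + i ↔ pc.1.1 - x = i from by omega,
              show pc.1.2 = y + j ↔ pc.1.2 - y = j from by omega]
      _ = (rest.map (fun pc => if (pc.1.1 - x ∈ I ∧ pc.1.2 - y ∈ J)
              ∧ P (pc.1.1 - x) (pc.1.2 - y) then pc.2 else 0)).sum
          + (I.map (fun i => (if pc.1.1 - x = i then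
              (if pc.1.2 - y ∈ J ∧ P i (pc.1.2 - y) then pc.2 else 0) else 0))).sum := by
          rw [PySem.List.sum_map_add_int, ih hnd.2]
          congr 1
          apply congrArg List.sum
          apply List.map_congr_left
          intro i _
          by_cases h1 : pc.1.1 - x = i
          · subst h1
            rw [show (fun j => (if pc.1.2 - y = j then
                (if P (pc.1.1 - x) j then (if pc.1.1 - x = pc.1.1 - x then pc.2 else 0) else 0) else 0))
              = (fun j => (if pc.1.2 - y = j then (if P (pc.1.1 - x) (pc.1.2 - y) then pc.2 else 0) else 0)) from
              funext fun j => by by_cases h2 : pc.1.2 - y = j <;> simp [h2]]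
            rw [pv_sum_indic J hJ (pc.1.2 - y) _]
            by_cases hm : pc.1.2 - y ∈ J <;> by_cases hp : P (pc.1.1 - x) (pc.1.2 - y) <;>
              simp [hm, hp]
          · simp [h1]
      _ = (List.map (fun pc =>
          if (pc.1.1 - x ∈ I ∧ pc.1.2 - y ∈ J) ∧ P (pc.1.1 - x) (pc.1.2 - y)
          then pc.2 else 0) (pc :: rest)).sum := by
          rw [show (fun i => (if pc.1.1 - x = i then
              (if pc.1.2 - y ∈ J ∧ P i (pc.1.2 - y) then pc.2 else 0) else 0))
            = (fun i => (if pc.1.1 - x = i then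
              (if pc.1.2 - y ∈ J ∧ P (pc.1.1 - x) (pc.1.2 - y) then pc.2 else 0) else 0)) from
            funext fun i => by by_cases h1 : pc.1.1 - x = i <;> simp [h1]]
          rw [pv_sum_indic I hI (pc.1.1 - x) _]
          simp only [List.map_cons, List.sum_cons]
          by_cases hmi : pc.1.1 - x ∈ I <;> by_cases hmj : pc.1.2 - y ∈ J <;>
            by_cases hp : P (pc.1.1 - x) (pc.1.2 - y) <;> simp [hmi, hmj, hp] <;> ring

-- A's inner double loop as a pair of window sums
lemma pvNcounts_eq (d : PySem.Dict (Int × Int) Int) (x y : Int) :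
    pvNcounts d x y =
      (((PySem.List.pyRange (-3) 4 1).map (fun i => ((PySem.List.pyRange (-3) 4 1).map (fun j =>
          d.getD (x + i, y + j) 0 * (if ¬(2 ≤ |i| ∨ 2 ≤ |j|) then 1 else 0))).sum)).sum,
       ((PySem.List.pyRange (-3) 4 1).map (fun i => ((PySem.List.pyRange (-3) 4 1).map (fun j =>
          d.getD (x + i, y + j) 0 * (if True then 1 else 0))).sum)).sum) := by
  have hin : ∀ (i : Int) (N : Int × Int),
      ((PySem.List.pyRange (-3) 4 1).foldl (fun N j =>
        let p := (x + i, y + j)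
        if d.contains p then
          let is_n3 : Int := if 2 ≤ |i| ∨ 2 ≤ |j| then 0 else 1
          let count := d.getD p 0
          (N.1 + count * is_n3, N.2 + count)
        else N) N)
      = (N.1 + ((PySem.List.pyRange (-3) 4 1).map (fun j =>
            d.getD (x + i, y + j) 0 * (if ¬(2 ≤ |i| ∨ 2 ≤ |j|) then 1 else 0))).sum,
         N.2 + ((PySem.List.pyRange (-3) 4 1).map (fun j =>
            d.getD (x + i, y + j) 0 * (if True then 1 else 0))).sum) := by
    intro i N
    have hpt : ∀ j ∈ PySem.List.pyRange (-3) 4 1, ∀ N : Int × Int,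
        (let p := (x + i, y + j)
         if d.contains p then
           let is_n3 : Int := if 2 ≤ |i| ∨ 2 ≤ |j| then 0 else 1
           let count := d.getD p 0
           (N.1 + count * is_n3, N.2 + count)
         else N)
        = (N.1 + d.getD (x + i, y + j) 0 * (if ¬(2 ≤ |i| ∨ 2 ≤ |j|) then 1 else 0),
           N.2 + d.getD (x + i, y + j) 0 * (if True then 1 else 0)) := by
      intro j _ N
      by_cases hc : d.contains (x + i, y + j)
      · by_cases hC : 2 ≤ |i| ∨ 2 ≤ |j| <;> simp [hc, hC]
      · have h0 : d.getD (x + i, y + j) 0 = 0 :=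
          PySem.Dict.getD_of_not_contains _ _ (by simpa using hc)
        simp [hc, h0]
    rw [PySem.List.foldl_congr_mem' _ _ _ _ hpt]
    obtain ⟨n1, n2⟩ := N
    rw [PySem.List.foldl_prod_mk
      (f := fun (a : Int) j => a + d.getD (x + i, y + j) 0 * (if ¬(2 ≤ |i| ∨ 2 ≤ |j|) then 1 else 0))
      (g := fun (a : Int) j => a + d.getD (x + i, y + j) 0 * (if True then 1 else 0))]
    rw [PySem.List.foldl_add, PySem.List.foldl_add]
  unfold pvNcounts
  rw [PySem.List.foldl_congr_mem' _ _ _ _ (fun i _ N => hin i N)]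
  rw [PySem.List.foldl_prod_mk
    (f := fun (a : Int) i => a + ((PySem.List.pyRange (-3) 4 1).map (fun j =>
        d.getD (x + i, y + j) 0 * (if ¬(2 ≤ |i| ∨ 2 ≤ |j|) then 1 else 0))).sum)
    (g := fun (a : Int) i => a + ((PySem.List.pyRange (-3) 4 1).map (fun j =>
        d.getD (x + i, y + j) 0 * (if True then 1 else 0))).sum)]
  rw [PySem.List.foldl_add, PySem.List.foldl_add]
  simp
lemma pv_getD_pvScatter (items : List ((Int × Int) × Int)) (r : Int) (k1 k2 : Int) :
    (pvScatter items r).getD (k1, k2) 0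
      = (items.map (fun pc => if k1 - pc.1.1 ∈ PySem.List.pyRange (-r) (r + 1) 1
          ∧ k2 - pc.1.2 ∈ PySem.List.pyRange (-r) (r + 1) 1 then pc.2 else 0)).sum := by
  unfold pvScatter
  rw [pv_scatter_items _ _ _ (PySem.List.nodup_pyRange_one _ _) (PySem.List.nodup_pyRange_one _ _)]
  simp

lemma pv_counts7 (d : PySem.Dict (Int × Int) Int) (hnd : d.keys.Nodup) (x y : Int) :
    (pvNcounts d x y).2 = (pvScatter d.items 3).getD (x, y) 0 := by
  obtain ⟨items⟩ := d
  have hnd' : (items.map (·.1)).Nodup := by simpa [PySem.Dict.keys_mk] using hnd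
  have hg := pv_gather_sum items hnd' (PySem.List.pyRange (-3) 4 1) (PySem.List.pyRange (-3) 4 1)
    (PySem.List.nodup_pyRange_one _ _) (PySem.List.nodup_pyRange_one _ _) x y (fun _ _ => True)
  simp only at hg
  rw [pvNcounts_eq, hg, pv_getD_pvScatter]
  apply congrArg List.sum
  apply List.map_congr_left
  intro pc _
  apply if_congr _ rfl rfl
  simp only [PySem.List.mem_pyRange_one, and_true]
  constructor <;> intro h <;> omega

lemma pv_counts3 (d : PySem.Dict (Int × Int) Int) (hnd : d.keys.Nodup) (x y : Int) :
    (pvNcounts d x y).1 = (pvScatter d.items 1).getD (x, y) 0 := by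
  obtain ⟨items⟩ := d
  have hnd' : (items.map (·.1)).Nodup := by simpa [PySem.Dict.keys_mk] using hnd
  have hg := pv_gather_sum items hnd' (PySem.List.pyRange (-3) 4 1) (PySem.List.pyRange (-3) 4 1)
    (PySem.List.nodup_pyRange_one _ _) (PySem.List.nodup_pyRange_one _ _) x y
    (fun i j => ¬(2 ≤ |i| ∨ 2 ≤ |j|))
  simp only at hg
  rw [pvNcounts_eq, hg, pv_getD_pvScatter]
  apply congrArg List.sum
  apply List.map_congr_left
  intro pc _
  apply if_congr _ rfl rfl
  simp only [PySem.List.mem_pyRange_one, le_abs]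
  constructor <;> intro h <;> omega

-- ===== VERDICT (by name: the statement is the Claim_ definition above) =====
theorem compute_outliers_spec : Claim_equal_compute_outliers := by
  intro point_count_map M _
  unfold Spec_compute_outliers
  simp only [compute_outliers, compute_outliers_alt]
  have hnd : (pvToDict point_count_map).keys.Nodup := PySem.Dict.nodup_keys_ofList _
  generalize hD : pvToDict point_count_map = d
  rw [hD] at hnd
  apply PySem.List.foldl_congr_mem'
  intro xy _ acc
  obtain ⟨x, y⟩ := xy
  rw [pv_counts7 d hnd x y, pv_counts3 d hnd x y]
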